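-- pv_equiv track=rewrite | github.com/Manuel-Baumann/BA | backend/scripts/script_visualizations.py | count_and_filter_terms
-- ===== SOURCE A (Python) =====
-- from collections import Counter
--
-- def count_and_filter_terms(terms, min_occurrences=20):
--     term_counts = Counter(terms)  # Count occurrences
--     filtered_counts = {
--         term: count for term, count in term_counts.items() if count >= min_occurrences
--     }  # Filter out terms with < 20 occurrences
--     sorted_counts = dict(
--         sorted(filtered_counts.items(), key=lambda item: item[0])
--     )  # Sort by term (ascending)
--     return sorted_counts
-- ===== SOURCE B (Python) =====
-- def count_and_filter_terms(terms, min_occurrences=20):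
--     # single pass over sorted(terms) with a running (prev, count) pair
--     s = sorted(terms)
--     result = {}
--     if not s:
--         return result
--     prev, count = s[0], 1
--     for term in s[1:]:
--         if term == prev:
--             count += 1
--         else:
--             if count >= min_occurrences:
--                 result[prev] = count
--             prev, count = term, 1
--     if count >= min_occurrences:
--         result[prev] = count
--     return result
-- ===== Notes on version B (the rewrite author's own statement) =====
-- stated objective: alternative
-- what changed: Replaces Counter+dict-comprehension-filter+sort-of-items by sorting the terms once and doing a single run-length pass that emits (term, count) for runs of length >= min_occurrences.
import Mathlib
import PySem

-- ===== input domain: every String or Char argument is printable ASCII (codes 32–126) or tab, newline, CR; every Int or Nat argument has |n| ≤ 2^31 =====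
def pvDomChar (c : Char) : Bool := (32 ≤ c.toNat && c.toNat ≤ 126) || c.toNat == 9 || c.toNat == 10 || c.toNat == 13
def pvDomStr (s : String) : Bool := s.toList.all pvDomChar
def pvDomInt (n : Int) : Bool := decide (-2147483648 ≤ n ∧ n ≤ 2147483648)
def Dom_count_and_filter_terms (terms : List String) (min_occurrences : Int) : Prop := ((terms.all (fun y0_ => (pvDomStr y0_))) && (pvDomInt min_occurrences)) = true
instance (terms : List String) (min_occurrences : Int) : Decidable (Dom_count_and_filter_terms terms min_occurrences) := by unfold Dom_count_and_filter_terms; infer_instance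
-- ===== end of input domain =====

-- B replaces Counter + filtering dict comprehension + sort of the items by one sorted() pass
-- with a running (prev, count) pair (alternative decomposition; no speed claim).

-- ===== PORT A =====
def count_and_filter_terms (terms : List String) (min_occurrences : Int) : List (String × Int) :=
  let term_counts := PySem.Dict.counter terms
  let filtered_counts : PySem.Dict String Int :=
    (term_counts.items.filter (fun p => decide (min_occurrences ≤ p.2))).foldl
      (fun d p => d.insert p.1 p.2) PySem.Dict.empty
  let sorted_counts : PySem.Dict String Int :=
    (PySem.List.sorted filtered_counts.items (fun p => p.1) false).foldl
      (fun d p => d.insert p.1 p.2) PySem.Dict.empty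
  sorted_counts.items

-- ===== PORT B =====
-- body of B's for-loop: advance the (result, prev, count) state by one term
def cfStep (min_occurrences : Int) (st : List (String × Int) × String × Int) (term : String) :
    List (String × Int) × String × Int :=
  if term == st.2.1 then (st.1, st.2.1, st.2.2 + 1)
  else ((if min_occurrences ≤ st.2.2 then st.1 ++ [(st.2.1, st.2.2)] else st.1), term, 1)

def count_and_filter_terms_alt (terms : List String) (min_occurrences : Int) : List (String × Int) :=
  match PySem.List.sorted terms (fun x => x) false with
  | [] => []
  | x :: xs =>
    let st := xs.foldl (cfStep min_occurrences) ([], x, (1 : Int))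
    if min_occurrences ≤ st.2.2 then st.1 ++ [(st.2.1, st.2.2)] else st.1

-- ===== PRECONDITION & SPEC =====
def Spec_count_and_filter_terms (terms : List String) (min_occurrences : Int) (out : List (String × Int)) : Prop := out = count_and_filter_terms_alt terms min_occurrences
instance (terms : List String) (min_occurrences : Int) (out : List (String × Int)) : Decidable (Spec_count_and_filter_terms terms min_occurrences out) := by unfold Spec_count_and_filter_terms; infer_instance

-- ===== CLAIM (what is proved, stated in full; the proofs are below) =====
def Claim_equal_count_and_filter_terms : Prop := ∀ (terms : List String) (min_occurrences : Int), Dom_count_and_filter_terms terms min_occurrences → Spec_count_and_filter_terms terms min_occurrences (count_and_filter_terms terms min_occurrences)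

-- ===== LEMMAS AND PROOFS =====

-- run-length state machine of B, written as a recursion on the remaining input
def cfr (m : Int) : Int → String → List String → List (String × Int)
  | c, p, [] => if m ≤ c then [(p, c)] else []
  | c, p, x :: xs =>
      if x == p then cfr m (c + 1) p xs
      else ((if m ≤ c then [(p, c)] else []) ++ cfr m 1 x xs)

-- run-length encoding with threshold, run by run
def runs (m : Int) : List String → List (String × Int)
  | [] => []
  | x :: xs =>
      (if m ≤ ((xs.takeWhile (· == x)).length : Int) + 1 then
         [(x, ((xs.takeWhile (· == x)).length : Int) + 1)] else [])
        ++ runs m (xs.dropWhile (· == x))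
termination_by s => s.length
decreasing_by simpa using Nat.lt_succ_of_le (List.dropWhile_sublist _).length_le

theorem foldl_cfStep (m : Int) (xs : List String) : ∀ (res : List (String × Int)) (p : String) (c : Int),
    (if m ≤ (xs.foldl (cfStep m) (res, p, c)).2.2
     then (xs.foldl (cfStep m) (res, p, c)).1 ++
          [((xs.foldl (cfStep m) (res, p, c)).2.1, (xs.foldl (cfStep m) (res, p, c)).2.2)]
     else (xs.foldl (cfStep m) (res, p, c)).1) = res ++ cfr m c p xs := by
  induction xs with
  | nil => intro res p c; simp only [List.foldl_nil, cfr]; split <;> simp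
  | cons x xs ih =>
    intro res p c
    simp only [List.foldl_cons, cfr, cfStep]
    by_cases h : x == p
    · simp only [h, if_pos]; exact ih res p (c + 1)
    · simp only [h, Bool.false_eq_true, if_neg, not_false_eq_true]
      rw [ih]
      split <;> simp

theorem cfr_eq_runs (m : Int) (xs : List String) : ∀ (c : Int) (p : String),
    cfr m c p xs =
      (if m ≤ c + ((xs.takeWhile (· == p)).length : Int) then
         [(p, c + ((xs.takeWhile (· == p)).length : Int))] else [])
        ++ runs m (xs.dropWhile (· == p)) := by
  induction xs with
  | nil => intro c p; simp [cfr, runs]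
  | cons x xs ih =>
    intro c p
    by_cases h : x == p
    · have hx : x = p := by simpa using h
      simp only [cfr, h, if_pos, List.takeWhile_cons_of_pos, List.dropWhile_cons_of_pos]
      rw [ih (c + 1) p]
      have hc : (c + 1) + ((xs.takeWhile (· == p)).length : Int)
          = c + (((xs.takeWhile (· == p)).length : Nat) + 1 : Nat) := by push_cast; ring
      rw [hc]
      simp
    · simp only [cfr, h, Bool.false_eq_true, if_neg, not_false_eq_true,
        List.takeWhile_cons_of_neg, List.dropWhile_cons_of_neg]
      rw [ih 1 x]
      show _ = (if m ≤ c + ((0 : Nat) : Int) then [(p, c + ((0 : Nat) : Int))] else []) ++ runs m (x :: xs)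
      have h1 : (1 : Int) + ((xs.takeWhile (· == x)).length : Int)
          = ((xs.takeWhile (· == x)).length : Int) + 1 := by ring
      rw [h1]
      simp [runs]

theorem cfr_one_eq_runs (m : Int) (x : String) (xs : List String) :
    cfr m 1 x xs = runs m (x :: xs) := by
  rw [cfr_eq_runs m xs 1 x]
  have h1 : (1 : Int) + ((xs.takeWhile (· == x)).length : Int)
      = ((xs.takeWhile (· == x)).length : Int) + 1 := by ring
  rw [h1]
  simp [runs]

theorem alt_eq_runs (terms : List String) (m : Int) :
    count_and_filter_terms_alt terms m = runs m (PySem.List.sorted terms (fun x => x) false) := by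
  unfold count_and_filter_terms_alt
  cases hs : PySem.List.sorted terms (fun x => x) false with
  | nil => simp [runs]
  | cons x xs =>
    simp only []
    rw [foldl_cfStep m xs [] x 1, List.nil_append, cfr_one_eq_runs]

theorem lt_of_mem_dropWhile (x : String) : ∀ (xs : List String), (∀ y ∈ xs, x ≤ y) →
    xs.Pairwise (· ≤ ·) → ∀ y ∈ xs.dropWhile (· == x), x < y := by
  intro xs
  induction xs with
  | nil => simp
  | cons a as ih =>
    intro hle hp y hy
    by_cases h : a == x
    · rw [List.dropWhile_cons_of_pos (p := fun y => y == x) h] at hy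
      exact ih (fun z hz => hle z (List.mem_cons_of_mem _ hz)) hp.of_cons y hy
    · rw [List.dropWhile_cons_of_neg (p := fun y => y == x) h] at hy
      have hax : x < a := lt_of_le_of_ne (hle a List.mem_cons_self)
        (fun e => h (by simp [← e]))
      rcases List.mem_cons.1 hy with rfl | hy'
      · exact hax
      · exact lt_of_lt_of_le hax ((List.pairwise_cons.1 hp).1 y hy')

theorem runs_fst_mem (m : Int) : ∀ (n : Nat) (s : List String), s.length ≤ n →
    ∀ q ∈ runs m s, q.1 ∈ s := by
  intro n
  induction n with
  | zero => intro s hlen; rw [List.length_eq_zero_iff.1 (Nat.le_zero.1 hlen)]; simp [runs]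
  | succ n ih =>
    intro s hlen q hq
    cases s with
    | nil => simp [runs] at hq
    | cons x xs =>
      rw [runs] at hq
      have hsub : (xs.dropWhile (· == x)).Sublist xs := List.dropWhile_sublist _
      rcases List.mem_append.1 hq with h1 | h2
      · by_cases hc : m ≤ ((xs.takeWhile (· == x)).length : Int) + 1
        · rw [if_pos hc] at h1
          rw [List.mem_singleton.1 h1]
          exact List.mem_cons_self
        · rw [if_neg hc] at h1
          simp at h1
      · have hrest : (xs.dropWhile (· == x)).length ≤ n := by
          have := hsub.length_le
          simp at hlen; omega
        exact List.mem_cons_of_mem _ (hsub.subset (ih _ hrest q h2))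

theorem runs_pairwise (m : Int) : ∀ (n : Nat) (s : List String), s.length ≤ n →
    s.Pairwise (· ≤ ·) → (runs m s).Pairwise (fun a b => a.1 < b.1) := by
  intro n
  induction n with
  | zero => intro s hlen _; rw [List.length_eq_zero_iff.1 (Nat.le_zero.1 hlen)]; simp [runs]
  | succ n ih =>
    intro s hlen hp
    cases s with
    | nil => simp [runs]
    | cons x xs =>
      rw [runs]
      have hsub : (xs.dropWhile (· == x)).Sublist xs := List.dropWhile_sublist _
      have hrestlen : (xs.dropWhile (· == x)).length ≤ n := by
        have := hsub.length_le
        simp at hlen; omega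
      have hrestp : (xs.dropWhile (· == x)).Pairwise (· ≤ ·) :=
        hp.of_cons.sublist hsub
      apply List.pairwise_append.2
      refine ⟨by split <;> simp, ih _ hrestlen hrestp, ?_⟩
      intro a ha b hb
      have ha' : a.1 = x := by
        by_cases hc : m ≤ ((xs.takeWhile (· == x)).length : Int) + 1
        · rw [if_pos hc] at ha
          rw [List.mem_singleton.1 ha]
        · rw [if_neg hc] at ha
          simp at ha
      have hb' : b.1 ∈ xs.dropWhile (· == x) := runs_fst_mem m n _ hrestlen b hb
      rw [ha']
      exact lt_of_mem_dropWhile x xs (List.pairwise_cons.1 hp).1 hp.of_cons b.1 hb'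

theorem foldl_add_absorb (x : String) : ∀ (run : List String), (∀ y ∈ run, y = x) →
    run.foldl PySem.Set.add [x] = [x] := by
  intro run
  induction run with
  | nil => simp
  | cons y run' ih =>
    intro hall
    have hy : y = x := hall y List.mem_cons_self
    rw [List.foldl_cons, hy, PySem.Set.add_of_mem (List.mem_singleton.2 rfl)]
    exact ih fun z hz => hall z (List.mem_cons_of_mem _ hz)

theorem ofList_head_run (x : String) (xs : List String) (hx : ∀ y ∈ xs.dropWhile (· == x), x < y) :
    PySem.Set.ofList (x :: xs) = x :: PySem.Set.ofList (xs.dropWhile (· == x)) := by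
  have hrun : ∀ y ∈ xs.takeWhile (· == x), y = x := by
    intro y hy
    have := List.mem_takeWhile_imp hy
    simpa using this
  rw [PySem.Set.ofList_eq_foldl, PySem.Set.ofList_eq_foldl]
  have h0 : PySem.Set.add ([] : List String) x = [x] := by
    simp [PySem.Set.add_of_not_mem]
  conv_lhs => rw [← List.takeWhile_append_dropWhile (p := (· == x)) (l := xs)]
  rw [List.foldl_cons, h0, List.foldl_append, foldl_add_absorb x _ hrun]
  have hupd : (xs.dropWhile (· == x)).foldl PySem.Set.add [x]
      = PySem.Set.update [x] (xs.dropWhile (· == x)) := rfl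
  rw [hupd, PySem.Set.update_eq_append_filter]
  have : ∀ y ∈ PySem.Set.ofList (xs.dropWhile (· == x)),
      (!PySem.Set.contains [x] y) = true := by
    intro y hy
    have hy' : y ∈ xs.dropWhile (· == x) := (PySem.Set.mem_ofList _ _).1 hy
    have : y ≠ x := fun e => absurd (hx y hy') (by rw [e]; exact lt_irrefl x)
    simp [PySem.Set.contains, this]
  rw [List.filter_eq_self.2 this]
  rfl

theorem runs_eq (m : Int) : ∀ (n : Nat) (s : List String), s.length ≤ n → s.Pairwise (· ≤ ·) →
    runs m s = ((PySem.List.dedup s).map (fun k => (k, (s.count k : Int)))).filter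
      (fun q => decide (m ≤ q.2)) := by
  intro n
  induction n with
  | zero => intro s hlen _; rw [List.length_eq_zero_iff.1 (Nat.le_zero.1 hlen)]; simp [runs]
  | succ n ih =>
    intro s hlen hp
    cases s with
    | nil => simp [runs]
    | cons x xs =>
      have hx : ∀ y ∈ xs.dropWhile (· == x), x < y :=
        lt_of_mem_dropWhile x xs (List.pairwise_cons.1 hp).1 hp.of_cons
      have hxnot : x ∉ xs.dropWhile (· == x) := fun h => lt_irrefl x (hx x h)
      have hrun : ∀ y ∈ xs.takeWhile (· == x), y = x := by
        intro y hy; have := List.mem_takeWhile_imp hy; simpa using this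
      have hsplit : xs.takeWhile (· == x) ++ xs.dropWhile (· == x) = xs :=
        List.takeWhile_append_dropWhile
      have hxs : List.count x xs = (xs.takeWhile (· == x)).length := by
        conv_lhs => rw [← hsplit]
        rw [List.count_append, List.count_eq_length.2 (fun y hy => (hrun y hy).symm),
          List.count_eq_zero.2 hxnot]
        simp
      have hcount : (x :: xs).count x = (xs.takeWhile (· == x)).length + 1 := by
        rw [List.count_cons_self, hxs]
      have hdedup : PySem.List.dedup (x :: xs) = x :: PySem.List.dedup (xs.dropWhile (· == x)) := by
        simp only [PySem.List.dedup_eq_ofList]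
        exact ofList_head_run x xs hx
      have htail : ∀ k ∈ PySem.List.dedup (xs.dropWhile (· == x)),
          ((x :: xs).count k : Int) = ((xs.dropWhile (· == x)).count k : Int) := by
        intro k hk
        have hk' : k ∈ xs.dropWhile (· == x) := by
          rw [PySem.List.dedup_eq_ofList] at hk
          exact (PySem.Set.mem_ofList _ _).1 hk
        have hkx : k ≠ x := fun e => absurd (hx k hk') (by rw [e]; exact lt_irrefl x)
        have hkrun : k ∉ xs.takeWhile (· == x) := fun h => hkx (hrun k h)
        have h1 : List.count k (x :: xs) = List.count k xs := by
          simp [Ne.symm hkx]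
        have h2 : List.count k xs = List.count k (xs.dropWhile (· == x)) := by
          conv_lhs => rw [← hsplit]
          rw [List.count_append, List.count_eq_zero.2 hkrun]
          simp
        rw [h1, h2]
      have hsub : (xs.dropWhile (· == x)).Sublist xs := List.dropWhile_sublist _
      have hrestlen : (xs.dropWhile (· == x)).length ≤ n := by
        have := hsub.length_le
        simp at hlen; omega
      have hrestp : (xs.dropWhile (· == x)).Pairwise (· ≤ ·) :=
        hp.of_cons.sublist hsub
      rw [runs, hdedup, List.map_cons, List.filter_cons]
      have hmapc : (PySem.List.dedup (xs.dropWhile (· == x))).map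
            (fun k => (k, ((x :: xs).count k : Int)))
          = (PySem.List.dedup (xs.dropWhile (· == x))).map
            (fun k => (k, ((xs.dropWhile (· == x)).count k : Int))) := by
        apply List.map_congr_left
        intro k hk
        rw [htail k hk]
      rw [hmapc, ← ih _ hrestlen hrestp, hcount]
      have hcast : (((xs.takeWhile (· == x)).length + 1 : Nat) : Int)
          = ((xs.takeWhile (· == x)).length : Int) + 1 := by push_cast; ring
      rw [hcast]
      by_cases hc : m ≤ ((xs.takeWhile (· == x)).length : Int) + 1 <;> simp [hc]

theorem A_closed (terms : List String) (m : Int) :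
    count_and_filter_terms terms m =
      PySem.List.sorted (((PySem.Set.ofList terms).map (fun k => (k, (terms.count k : Int)))).filter
        (fun q => decide (m ≤ q.2))) (fun q => q.1) false := by
  unfold count_and_filter_terms
  simp only []
  set F := (PySem.Dict.counter terms).items.filter (fun p => decide (m ≤ p.2)) with hFdef
  have hnodupKeys : ((PySem.Dict.counter terms).items.map (fun p => p.1)).Nodup := by
    have h := PySem.Dict.nodup_keys_counter (xs := terms)
    simpa [PySem.Dict.keys] using h
  have hFnodup : (F.map (fun p => p.1)).Nodup :=
    hnodupKeys.sublist (List.Sublist.map _ List.filter_sublist)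
  have h1 : ((F.foldl (fun d p => d.insert p.1 p.2) PySem.Dict.empty)).items = F := by
    have h := PySem.Dict.items_foldl_insert_fresh (l := F)
      (k := fun p : String × Int => p.1) (v := fun p : String × Int => p.2)
      (d := PySem.Dict.empty) (fun a _ => by simp) hFnodup
    simpa using h
  rw [h1]
  set Fs := PySem.List.sorted F (fun p => p.1) false with hFsdef
  have hperm : Fs.Perm F := PySem.List.sorted_perm _ _ _
  have hFsnodup : (Fs.map (fun p => p.1)).Nodup := ((hperm.map _).nodup_iff).2 hFnodup
  have h2 : ((Fs.foldl (fun d p => d.insert p.1 p.2) PySem.Dict.empty)).items = Fs := by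
    have h := PySem.Dict.items_foldl_insert_fresh (l := Fs)
      (k := fun p : String × Int => p.1) (v := fun p : String × Int => p.2)
      (d := PySem.Dict.empty) (fun a _ => by simp) hFsnodup
    simpa using h
  rw [h2, hFsdef, hFdef, PySem.Dict.items_counter]

-- ===== VERDICT (by name: the statement is the Claim_ definition above) =====
theorem count_and_filter_terms_spec : Claim_equal_count_and_filter_terms := by
  intro terms m _
  unfold Spec_count_and_filter_terms
  have hperm : (PySem.List.sorted terms (fun x => x) false).Perm terms :=
    PySem.List.sorted_perm _ _ _
  have hs : (PySem.List.sorted terms (fun x => x) false).Pairwise (· ≤ ·) := by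
    simpa using PySem.List.sorted_pairwise (xs := terms) (key := fun x => x)
  rw [A_closed, alt_eq_runs]
  apply PySem.List.sorted_eq_of_perm_of_pairwise_lt
  · rw [runs_eq m (PySem.List.sorted terms (fun x => x) false).length _ (le_refl _) hs]
    apply List.Perm.filter
    have hcnt : ∀ k ∈ PySem.List.dedup (PySem.List.sorted terms (fun x => x) false),
        ((k, ((PySem.List.sorted terms (fun x => x) false).count k : Int)) : String × Int)
          = (k, (terms.count k : Int)) := by
      intro k _
      rw [hperm.count_eq k]
    rw [List.map_congr_left hcnt]
    apply List.Perm.map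
    have hmem : ∀ a, a ∈ PySem.List.dedup (PySem.List.sorted terms (fun x => x) false)
        ↔ a ∈ PySem.Set.ofList terms := by
      intro a
      rw [PySem.List.dedup_eq_ofList, PySem.Set.mem_ofList, PySem.Set.mem_ofList]
      exact ⟨fun h => hperm.subset h, fun h => hperm.symm.subset h⟩
    have hnd1 : (PySem.List.dedup (PySem.List.sorted terms (fun x => x) false)).Nodup := by
      rw [PySem.List.dedup_eq_ofList]
      exact PySem.Set.nodup_ofList _
    exact (List.perm_ext_iff_of_nodup hnd1 (PySem.Set.nodup_ofList _)).2 hmem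
  · exact runs_pairwise m (PySem.List.sorted terms (fun x => x) false).length _ (le_refl _) hs
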